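-- pv_equiv track=rewrite | github.com/NatesVibeCode/Praxis | Code&DBs/Workflow/runtime/intent_composition.py | _scopes_overlap
-- ===== SOURCE A (Python) =====
-- def _scopes_overlap(a_scope: list[str], b_scope: list[str]) -> bool:
--     """Return True when two file-path scopes share any common path.
--
--     Honest-scope match — two scopes overlap when one is equal to the other,
--     one is a directory prefix of the other, or both resolve to the same
--     workspace root. Normalizes trailing slashes and ``./`` prefixes.
--     """
--
--     def _normalize(entry: str) -> str:
--         text = (entry or "").strip()
--         if text.startswith("./"):
--             text = text[2:]
--         return text.rstrip("/")
--
--     a_norm = {_normalize(p) for p in (a_scope or []) if p}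
--     b_norm = {_normalize(p) for p in (b_scope or []) if p}
--     if not a_norm or not b_norm:
--         return False
--     for a in a_norm:
--         for b in b_norm:
--             if a == b:
--                 return True
--             # Directory-prefix match — 'src/' covers 'src/foo.py'.
--             if a and b and (
--                 (a + "/").startswith(b + "/") or (b + "/").startswith(a + "/")
--             ):
--                 return True
--             # Workspace-root ('.') covers every other scope.
--             if a == "." or b == ".":
--                 return True
--     return False
-- ===== SOURCE B (Python) =====
-- def _scopes_overlap(a_scope: list[str], b_scope: list[str]) -> bool:
--     def _normalize(entry: str) -> str:
--         text = (entry or "").strip()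
--         if text.startswith("./"):
--             text = text[2:]
--         return text.rstrip("/")
--
--     a_norm = {_normalize(p) for p in (a_scope or []) if p}
--     b_norm = {_normalize(p) for p in (b_scope or []) if p}
--     if not a_norm or not b_norm:
--         return False
--     # Workspace-root ('.') covers every other scope.
--     if "." in a_norm or "." in b_norm:
--         return True
--
--     def _covers(xs, ys):
--         # some x in xs is equal to, or lies strictly under, an entry of ys
--         for x in xs:
--             if x in ys:
--                 return True
--             for i, c in enumerate(x):
--                 if i and c == "/" and x[:i] in ys:
--                     return True
--         return False
--
--     return _covers(a_norm, b_norm) or _covers(b_norm, a_norm)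
-- ===== Notes on version B (the rewrite author's own statement) =====
-- stated objective: alternative
-- what changed: Instead of A's nested all-pairs prefix scan over the two normalized sets, B checks '.' membership once and then tests each path and its slash-separated ancestor prefixes against the other set with hash lookups.
import Mathlib
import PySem

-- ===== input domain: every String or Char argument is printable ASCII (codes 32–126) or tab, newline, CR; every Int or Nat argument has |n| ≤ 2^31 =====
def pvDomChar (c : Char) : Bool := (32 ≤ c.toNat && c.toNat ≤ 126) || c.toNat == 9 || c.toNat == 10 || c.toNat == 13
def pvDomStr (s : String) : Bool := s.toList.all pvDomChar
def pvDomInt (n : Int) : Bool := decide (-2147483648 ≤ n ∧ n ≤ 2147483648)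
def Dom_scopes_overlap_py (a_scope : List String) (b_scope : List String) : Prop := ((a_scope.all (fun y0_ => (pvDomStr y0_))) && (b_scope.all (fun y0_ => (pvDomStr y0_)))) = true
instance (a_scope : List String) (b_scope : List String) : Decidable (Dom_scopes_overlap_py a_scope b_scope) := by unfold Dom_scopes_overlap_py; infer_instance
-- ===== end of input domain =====

-- B replaces A's all-pairs nested scan by a '.'-membership check plus per-path ancestor-prefix set lookups (different algorithm); return value only, no mutation.

-- _normalize (the identical inner helper of both Pythons), over code points.
-- text.rstrip("/") is ported by hand as reverse/dropWhile/reverse — exact: it drops exactly the trailing '/' characters.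
def pvNorm (s : String) : List Char :=
  let t := PySem.Chars.strip s.toList
  let t := if PySem.Chars.startswith t ['.', '/'] then PySem.List.slice t (some 2) none else t
  (t.reverse.dropWhile (fun c => c == '/')).reverse

-- ===== PORT A =====
def scopes_overlap_py (a_scope : List String) (b_scope : List String) : Bool :=
  let a_norm : PySem.Set (List Char) :=
    PySem.Set.ofList ((a_scope.filter (fun p => !(p == ""))).map (fun p => pvNorm p))
  let b_norm : PySem.Set (List Char) :=
    PySem.Set.ofList ((b_scope.filter (fun p => !(p == ""))).map (fun p => pvNorm p))
  if a_norm.isEmpty || b_norm.isEmpty then false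
  else
    a_norm.any (fun a => b_norm.any (fun b =>
      a == b ||
      (!a.isEmpty && !b.isEmpty &&
        (PySem.Chars.startswith (a ++ ['/']) (b ++ ['/']) ||
         PySem.Chars.startswith (b ++ ['/']) (a ++ ['/']))) ||
      a == ['.'] || b == ['.']))

-- ===== PORT B =====
-- _covers(xs, ys): some x in xs equals, or lies strictly under, an entry of ys
def pvCovers (xs ys : PySem.Set (List Char)) : Bool :=
  xs.any (fun x =>
    PySem.Set.contains ys x ||
    (PySem.List.enumerate x).any (fun ic =>
      ic.1 != 0 && ic.2 == '/' && PySem.Set.contains ys (PySem.List.slice x none (some ic.1))))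

def scopes_overlap_py_alt (a_scope : List String) (b_scope : List String) : Bool :=
  let a_norm : PySem.Set (List Char) :=
    PySem.Set.ofList ((a_scope.filter (fun p => !(p == ""))).map (fun p => pvNorm p))
  let b_norm : PySem.Set (List Char) :=
    PySem.Set.ofList ((b_scope.filter (fun p => !(p == ""))).map (fun p => pvNorm p))
  if a_norm.isEmpty || b_norm.isEmpty then false
  else if PySem.Set.contains a_norm ['.'] || PySem.Set.contains b_norm ['.'] then true
  else pvCovers a_norm b_norm || pvCovers b_norm a_norm

-- ===== PRECONDITION & SPEC =====
def Spec_scopes_overlap_py (a_scope : List String) (b_scope : List String) (out : Bool) : Prop := out = scopes_overlap_py_alt a_scope b_scope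
instance (a_scope : List String) (b_scope : List String) (out : Bool) : Decidable (Spec_scopes_overlap_py a_scope b_scope out) := by unfold Spec_scopes_overlap_py; infer_instance

-- ===== CLAIM (what is proved, stated in full; the proofs are below) =====
def Claim_equal_scopes_overlap_py : Prop := ∀ (a_scope : List String) (b_scope : List String), Dom_scopes_overlap_py a_scope b_scope → Spec_scopes_overlap_py a_scope b_scope (scopes_overlap_py a_scope b_scope)

-- ===== LEMMAS AND PROOFS =====

-- 'y is a proper slash-separated ancestor prefix of x'
def pvAnc (x y : List Char) : Prop :=
  ∃ k, 0 < k ∧ ∃ h : k < x.length, x[k] = '/' ∧ x.take k = y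

lemma pvAnc_ne_nil_left {x y : List Char} (h : pvAnc x y) : x ≠ [] := by
  obtain ⟨k, _, hk, _⟩ := h; intro hx; subst hx; simp at hk

lemma pvAnc_ne_nil_right {x y : List Char} (h : pvAnc x y) : y ≠ [] := by
  obtain ⟨k, hk0, hk, _, ht⟩ := h
  intro hy
  have hl : (List.take k x).length = 0 := by rw [ht, hy]; rfl
  rw [List.length_take] at hl
  omega

-- the slash-boundary prefix test, characterized
lemma pvStartswith_iff (a b : List Char) (hb : b ≠ []) :
    PySem.Chars.startswith (a ++ ['/']) (b ++ ['/']) = true ↔ a = b ∨ pvAnc a b := by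
  rw [PySem.Chars.startswith_iff]
  constructor
  · intro h
    have hlen := h.length_le
    simp at hlen
    rcases Nat.lt_or_ge b.length a.length with hlt | hge
    · right
      have heq := List.prefix_iff_eq_take.mp h
      simp only [List.length_append, List.length_cons, List.length_nil, Nat.zero_add] at heq
      rw [List.take_append_of_le_length (by omega), List.take_add_one] at heq
      have hc : a[b.length]? = some (a[b.length]'(by omega)) :=
        List.getElem?_eq_getElem (by omega)
      rw [hc] at heq
      simp only [Option.toList_some] at heq
      obtain ⟨h1, h2⟩ := List.append_inj' heq (by simp)
      simp only [List.cons.injEq] at h2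
      exact ⟨b.length, List.length_pos_of_ne_nil hb, by omega, h2.1.symm, h1.symm⟩
    · left
      have heq := List.IsPrefix.eq_of_length h (by simp; omega)
      exact (List.append_inj' heq (by simp)).1.symm
  · rintro (rfl | ⟨k, hk0, hk, hc, ht⟩)
    · exact List.prefix_refl _
    · have h1 : a.take k ++ ['/'] = a.take (k + 1) := by
        rw [List.take_add_one, List.getElem?_eq_getElem hk, hc]
        rfl
      rw [← ht, h1]
      exact (List.take_prefix _ _).trans (List.prefix_append _ _)

-- per-pair condition of A's inner loop, with no '.' entries around
lemma pvPair_iff (a b : List Char) (ha : a ≠ ['.']) (hb : b ≠ ['.']) :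
    (a == b ||
      (!a.isEmpty && !b.isEmpty &&
        (PySem.Chars.startswith (a ++ ['/']) (b ++ ['/']) ||
         PySem.Chars.startswith (b ++ ['/']) (a ++ ['/']))) ||
      a == ['.'] || b == ['.']) = true ↔ a = b ∨ pvAnc a b ∨ pvAnc b a := by
  simp only [Bool.or_eq_true, Bool.and_eq_true, Bool.not_eq_eq_eq_not, Bool.not_true,
    List.isEmpty_eq_false_iff, beq_iff_eq, ha, hb, or_false]
  constructor
  · rintro (rfl | ⟨⟨hna, hnb⟩, h | h⟩)
    · exact Or.inl rfl
    · rcases (pvStartswith_iff a b hnb).mp h with rfl | h'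
      · exact Or.inl rfl
      · exact Or.inr (Or.inl h')
    · rcases (pvStartswith_iff b a hna).mp h with rfl | h'
      · exact Or.inl rfl
      · exact Or.inr (Or.inr h')
  · rintro (rfl | h | h)
    · exact Or.inl rfl
    · exact Or.inr ⟨⟨pvAnc_ne_nil_left h, pvAnc_ne_nil_right h⟩,
        Or.inl ((pvStartswith_iff a b (pvAnc_ne_nil_right h)).mpr (Or.inr h))⟩
    · exact Or.inr ⟨⟨pvAnc_ne_nil_right h, pvAnc_ne_nil_left h⟩,
        Or.inr ((pvStartswith_iff b a (pvAnc_ne_nil_right h)).mpr (Or.inr h))⟩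

-- B's _covers, as an existential
lemma pvCovers_iff (X Y : PySem.Set (List Char)) :
    pvCovers X Y = true ↔ ∃ x ∈ X, x ∈ Y ∨ ∃ y ∈ Y, pvAnc x y := by
  unfold pvCovers
  rw [List.any_eq_true]
  constructor
  · rintro ⟨x, hx, h⟩
    refine ⟨x, hx, ?_⟩
    rcases Bool.or_eq_true_iff.mp h with h | h
    · exact Or.inl ((PySem.Set.contains_iff _ _).mp h)
    · right
      obtain ⟨ic, hmem, hc⟩ := List.any_eq_true.mp h
      obtain ⟨k, hk, hic⟩ := (PySem.List.mem_enumerate_iff x 0 ic).mp hmem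
      rw [hic] at hc
      simp only [zero_add, Bool.and_eq_true, bne_iff_ne, ne_eq, beq_iff_eq,
        PySem.List.slice_to_natCast] at hc
      obtain ⟨⟨hk0, hsl⟩, hcont⟩ := hc
      refine ⟨x.take k, (PySem.Set.contains_iff _ _).mp hcont, k, ?_, hk, hsl, rfl⟩
      omega
  · rintro ⟨x, hx, hy | ⟨y, hy, k, hk0, hk, hc, ht⟩⟩
    · exact ⟨x, hx, Bool.or_eq_true_iff.mpr (Or.inl ((PySem.Set.contains_iff _ _).mpr hy))⟩
    · refine ⟨x, hx, Bool.or_eq_true_iff.mpr (Or.inr ?_)⟩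
      rw [List.any_eq_true]
      refine ⟨((k : Int), x[k]), (PySem.List.mem_enumerate_iff x 0 _).mpr ⟨k, hk, by simp⟩, ?_⟩
      simp only [Bool.and_eq_true, bne_iff_ne, ne_eq, beq_iff_eq,
        PySem.List.slice_to_natCast]
      rw [ht]
      exact ⟨⟨by omega, hc⟩, (PySem.Set.contains_iff _ _).mpr hy⟩

-- A's nested scan equals B's two _covers passes, when neither set holds '.'
lemma pvNoDot_eq (A B : PySem.Set (List Char))
    (hA : ['.'] ∉ A) (hB : ['.'] ∉ B) :
    (A.any (fun a => B.any (fun b =>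
      a == b ||
      (!a.isEmpty && !b.isEmpty &&
        (PySem.Chars.startswith (a ++ ['/']) (b ++ ['/']) ||
         PySem.Chars.startswith (b ++ ['/']) (a ++ ['/']))) ||
      a == ['.'] || b == ['.']))) = (pvCovers A B || pvCovers B A) := by
  apply Bool.eq_iff_iff.mpr
  rw [Bool.or_eq_true, pvCovers_iff, pvCovers_iff, List.any_eq_true]
  constructor
  · rintro ⟨a, haA, h⟩
    obtain ⟨b, hbB, hcond⟩ := List.any_eq_true.mp h
    have ha : a ≠ ['.'] := fun e => hA (e ▸ haA)
    have hb : b ≠ ['.'] := fun e => hB (e ▸ hbB)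
    rcases (pvPair_iff a b ha hb).mp hcond with rfl | h' | h'
    · exact Or.inl ⟨a, haA, Or.inl hbB⟩
    · exact Or.inl ⟨a, haA, Or.inr ⟨b, hbB, h'⟩⟩
    · exact Or.inr ⟨b, hbB, Or.inr ⟨a, haA, h'⟩⟩
  · rintro (⟨a, haA, hbB | ⟨b, hbB, h'⟩⟩ | ⟨b, hbA, hbB | ⟨a, haA, h'⟩⟩)
    · exact ⟨a, haA, List.any_eq_true.mpr ⟨a, hbB,
        (pvPair_iff a a (fun e => hA (e ▸ haA)) (fun e => hA (e ▸ haA))).mpr (Or.inl rfl)⟩⟩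
    · exact ⟨a, haA, List.any_eq_true.mpr ⟨b, hbB,
        (pvPair_iff a b (fun e => hA (e ▸ haA)) (fun e => hB (e ▸ hbB))).mpr (Or.inr (Or.inl h'))⟩⟩
    · exact ⟨b, hbB, List.any_eq_true.mpr ⟨b, hbA,
        (pvPair_iff b b (fun e => hB (e ▸ hbA)) (fun e => hB (e ▸ hbA))).mpr (Or.inl rfl)⟩⟩
    · exact ⟨a, haA, List.any_eq_true.mpr ⟨b, hbA,
        (pvPair_iff a b (fun e => hA (e ▸ haA)) (fun e => hB (e ▸ hbA))).mpr (Or.inr (Or.inr h'))⟩⟩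

-- ===== VERDICT (by name: the statement is the Claim_ definition above) =====
theorem scopes_overlap_py_spec : Claim_equal_scopes_overlap_py := by
  intro a_scope b_scope _
  unfold Spec_scopes_overlap_py scopes_overlap_py scopes_overlap_py_alt
  set A : PySem.Set (List Char) :=
    PySem.Set.ofList ((a_scope.filter (fun p => !(p == ""))).map (fun p => pvNorm p)) with hAdef
  set B : PySem.Set (List Char) :=
    PySem.Set.ofList ((b_scope.filter (fun p => !(p == ""))).map (fun p => pvNorm p)) with hBdef
  by_cases he : (A.isEmpty || B.isEmpty) = true
  · rw [if_pos he, if_pos he]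
  · rw [if_neg he, if_neg he]
    by_cases hdot : (PySem.Set.contains A ['.'] || PySem.Set.contains B ['.']) = true
    · rw [if_pos hdot]
      have hne : A ≠ [] ∧ B ≠ [] := by
        simp only [Bool.or_eq_true, List.isEmpty_iff] at he
        exact ⟨fun h => he (Or.inl h), fun h => he (Or.inr h)⟩
      obtain ⟨a0, ha0⟩ := List.exists_mem_of_ne_nil _ hne.1
      obtain ⟨b0, hb0⟩ := List.exists_mem_of_ne_nil _ hne.2
      rcases Bool.or_eq_true_iff.mp hdot with hd | hd
      · exact List.any_eq_true.mpr ⟨['.'], (PySem.Set.contains_iff _ _).mp hd,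
          List.any_eq_true.mpr ⟨b0, hb0, by simp⟩⟩
      · exact List.any_eq_true.mpr ⟨a0, ha0,
          List.any_eq_true.mpr ⟨['.'], (PySem.Set.contains_iff _ _).mp hd, by simp⟩⟩
    · rw [if_neg hdot]
      simp only [Bool.or_eq_true, not_or, PySem.Set.contains_iff] at hdot
      exact pvNoDot_eq A B (fun h => hdot.1 h) (fun h => hdot.2 h)
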